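-- pv_equiv track=rewrite | github.com/yi-zhang/tcga_bc_tools | rnatable_tcga/rnatable_func.py | check_patdupsamp
-- ===== SOURCE A (Python) =====
-- def check_patdupsamp(allbarcode_list):
--     """check patients with duplicate samples; return a dict with patients and their duplicated samples.
--     # An example for input barcodelist:
--     # tcgaTPcol=[re.match('TCGA.+\-01[AB]\-.+',term).group() for term in allbarcode_list if re.match('TCGA.+\-01[AB]\-.+',term)]
--     """
--     seenpats= []
--     duppats = {}
--     for barcode in allbarcode_list:
--         if(barcode[:12] not in seenpats):
--             seenpats.append(barcode[:12])
--         else: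
--             duppat = barcode[:12]
--             duppat_barcode = [t for t in allbarcode_list if t[:12] == duppat ]
--             duppats.update({duppat:duppat_barcode})
--     return(duppats)
-- ===== SOURCE B (Python) =====
-- def check_patdupsamp(allbarcode_list):
--     """check patients with duplicate samples; return a dict with patients and their duplicated samples."""
--     groups = {}
--     for barcode in allbarcode_list:
--         groups.setdefault(barcode[:12], []).append(barcode)
--     duppats = {}
--     count = {}
--     for barcode in allbarcode_list:
--         pat = barcode[:12]
--         c = count.get(pat, 0) + 1
--         count[pat] = c
--         if c == 2:
--             duppats[pat] = groups[pat]
--     return duppats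
-- ===== Notes on version B (the rewrite author's own statement) =====
-- stated objective: faster
-- what changed: Replaced the seen-list membership scan plus full-list rescan on every duplicate with two linear passes: one dict pass grouping barcodes by 12-char prefix, then one counting pass that emits each prefix's group at its second occurrence.
import Mathlib
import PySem

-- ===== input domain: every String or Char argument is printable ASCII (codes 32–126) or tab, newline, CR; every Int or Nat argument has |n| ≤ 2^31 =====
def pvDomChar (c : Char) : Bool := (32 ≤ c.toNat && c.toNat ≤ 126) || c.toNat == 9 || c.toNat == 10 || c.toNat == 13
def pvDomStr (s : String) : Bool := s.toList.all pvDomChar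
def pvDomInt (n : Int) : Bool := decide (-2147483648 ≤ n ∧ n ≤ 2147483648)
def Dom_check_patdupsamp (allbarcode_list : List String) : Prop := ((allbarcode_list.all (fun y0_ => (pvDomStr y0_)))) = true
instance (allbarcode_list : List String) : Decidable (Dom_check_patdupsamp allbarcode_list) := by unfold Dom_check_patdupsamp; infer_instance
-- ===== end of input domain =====

-- B replaces A's per-duplicate full-list rescan and seen-list scan with two linear passes
-- (group by 12-char prefix, then count and emit each group at its second occurrence): faster.

-- barcode[:12]
def pvPre12 (s : String) : String := PySem.Str.slice s none (some 12)

-- ===== PORT A =====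
def check_patdupsamp (allbarcode_list : List String) : List (String × List String) :=
  (allbarcode_list.foldl
    (fun (st : List String × PySem.Dict String (List String)) barcode =>
      if st.1.contains (pvPre12 barcode) = false then
        (st.1 ++ [pvPre12 barcode], st.2)
      else
        (st.1, st.2.insert (pvPre12 barcode)
          (allbarcode_list.filter (fun t => pvPre12 t == pvPre12 barcode))))
    ([], PySem.Dict.empty)).2.items

-- ===== PORT B =====
def check_patdupsamp_alt (allbarcode_list : List String) : List (String × List String) :=
  let groups : PySem.Dict String (List String) :=
    allbarcode_list.foldl
      (fun g barcode => g.modify (pvPre12 barcode) [] (· ++ [barcode]))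
      PySem.Dict.empty
  (allbarcode_list.foldl
    (fun (st : PySem.Dict String Int × PySem.Dict String (List String)) barcode =>
      -- groups[pat] ported as getD: exact here, since pat is always a key of groups
      if (st.1.getD (pvPre12 barcode) 0 + 1) == 2 then
        (st.1.insert (pvPre12 barcode) (st.1.getD (pvPre12 barcode) 0 + 1),
         st.2.insert (pvPre12 barcode) (groups.getD (pvPre12 barcode) []))
      else
        (st.1.insert (pvPre12 barcode) (st.1.getD (pvPre12 barcode) 0 + 1), st.2))
    (PySem.Dict.empty, PySem.Dict.empty)).2.items

-- ===== PRECONDITION & SPEC =====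
def Spec_check_patdupsamp (allbarcode_list : List String) (out : List (String × List String)) : Prop := out = check_patdupsamp_alt allbarcode_list
instance (allbarcode_list : List String) (out : List (String × List String)) : Decidable (Spec_check_patdupsamp allbarcode_list out) := by unfold Spec_check_patdupsamp; infer_instance

-- ===== CLAIM (what is proved, stated in full; the proofs are below) =====
def Claim_equal_check_patdupsamp : Prop := ∀ (allbarcode_list : List String), Dom_check_patdupsamp allbarcode_list → Spec_check_patdupsamp allbarcode_list (check_patdupsamp allbarcode_list)

-- ===== LEMMAS AND PROOFS =====

theorem pv_contains_false_of_not_mem (l : List String) (a : String) (h : a ∉ l) :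
    l.contains a = false := by
  cases hc : l.contains a with
  | false => rfl
  | true => exact absurd (List.contains_iff_mem.mp hc) h

-- groups.getD p [] is the filter of the whole list by prefix p
theorem pv_getD_groups (l : List String) (g : PySem.Dict String (List String)) (p : String) :
    (l.foldl (fun g barcode => g.modify (pvPre12 barcode) [] (· ++ [barcode])) g).getD p []
      = g.getD p [] ++ l.filter (fun t => pvPre12 t == p) := by
  induction l generalizing g with
  | nil => simp
  | cons b t ih =>
    simp only [List.foldl_cons, List.filter_cons, ih]
    rw [PySem.Dict.getD_modify]
    by_cases h : p = pvPre12 b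
    · subst h; simp
    · have hb : ¬ (pvPre12 b == p) = true := by
        simp only [beq_iff_eq]; exact fun e => h e.symm
      simp [h, hb]

-- inserting a value already present (under unique keys) is a no-op
theorem pv_insert_self_eq {d : PySem.Dict String (List String)} {k : String} {v : List String}
    (hnd : d.keys.Nodup) (h : d.get? k = some v) : d.insert k v = d := by
  have hc : d.contains k = true := by
    rw [PySem.Dict.contains_eq_isSome_get?, h]; rfl
  apply PySem.Dict.ext
  rw [PySem.Dict.items_insert_of_contains d v hc]
  have hid : ∀ q ∈ d.items, (if (q.1 == k) = true then (k, v) else q) = q := by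
    intro q hq
    obtain ⟨qk, qv⟩ := q
    by_cases he : qk = k
    · have hv : d.get? qk = some qv := PySem.Dict.get?_of_mem_items d hq hnd
      rw [he, h] at hv
      simp [he, ← Option.some_inj.mp hv]
    · simp [he]
  rw [List.map_congr_left hid]
  simp

-- the main invariant: A's fold and B's second fold build equal duplicate dicts
theorem pv_main (L ys : List String) :
    ∀ (seen : List String) (cnt : PySem.Dict String Int) (dup : PySem.Dict String (List String)),
    dup.keys.Nodup →
    (∀ p, 0 ≤ cnt.getD p 0) →
    (∀ p, p ∈ seen ↔ 1 ≤ cnt.getD p 0) →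
    (∀ p, dup.contains p = true ↔ 2 ≤ cnt.getD p 0) →
    (∀ p v, dup.get? p = some v → v = L.filter (fun t => pvPre12 t == p)) →
    (ys.foldl
      (fun (st : List String × PySem.Dict String (List String)) barcode =>
        if st.1.contains (pvPre12 barcode) = false then
          (st.1 ++ [pvPre12 barcode], st.2)
        else
          (st.1, st.2.insert (pvPre12 barcode) (L.filter (fun t => pvPre12 t == pvPre12 barcode))))
      (seen, dup)).2
    = (ys.foldl
      (fun (st : PySem.Dict String Int × PySem.Dict String (List String)) barcode =>
        if (st.1.getD (pvPre12 barcode) 0 + 1) == 2 then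
          (st.1.insert (pvPre12 barcode) (st.1.getD (pvPre12 barcode) 0 + 1),
           st.2.insert (pvPre12 barcode) (L.filter (fun t => pvPre12 t == pvPre12 barcode)))
        else
          (st.1.insert (pvPre12 barcode) (st.1.getD (pvPre12 barcode) 0 + 1), st.2))
      (cnt, dup)).2 := by
  induction ys with
  | nil => intro seen cnt dup _ _ _ _ _; rfl
  | cons b t ih =>
    intro seen cnt dup hnd hpos hseen hdup hval
    simp only [List.foldl_cons]
    by_cases hs : pvPre12 b ∈ seen
    · -- duplicate occurrence: A inserts into duppats; the count before this element is ≥ 1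
      have hsc : seen.contains (pvPre12 b) = true := List.contains_iff_mem.mpr hs
      have hc1 : 1 ≤ cnt.getD (pvPre12 b) 0 := (hseen _).mp hs
      rw [if_neg (by rw [hsc]; simp)]
      by_cases h2 : cnt.getD (pvPre12 b) 0 = 1
      · -- second occurrence: both sides insert the same value
        rw [if_pos (by simp [h2])]
        apply ih
        · exact PySem.Dict.nodup_keys_insert _ _ _ hnd
        · intro q; rw [PySem.Dict.getD_insert]
          split_ifs with hq
          · have := hpos (pvPre12 b); omega
          · exact hpos q
        · intro q; rw [PySem.Dict.getD_insert]
          split_ifs with hq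
          · exact iff_of_true (hq ▸ hs) (by omega)
          · exact hseen q
        · intro q; rw [PySem.Dict.getD_insert, PySem.Dict.contains_insert]
          by_cases hq : q = pvPre12 b
          · subst hq; simp [h2]
          · have hbq : ¬ (q == pvPre12 b) = true := by simp [hq]
            simp only [hbq, Bool.false_or, if_neg hq]
            exact hdup q
        · intro q v hv
          by_cases hq : q = pvPre12 b
          · subst hq; rw [PySem.Dict.get?_insert_self] at hv
            exact (Option.some_inj.mp hv).symm
          · rw [PySem.Dict.get?_insert_of_ne _ _ hq] at hv
            exact hval q v hv
      · -- third or later occurrence: A's insert is a no-op, B does not insert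
        have hc2 : 2 ≤ cnt.getD (pvPre12 b) 0 := by omega
        have hdc : dup.contains (pvPre12 b) = true := (hdup _).mpr hc2
        have hvv : ∃ v, dup.get? (pvPre12 b) = some v := by
          have h := PySem.Dict.contains_eq_isSome_get? dup (pvPre12 b)
          rw [hdc] at h
          exact Option.isSome_iff_exists.mp h.symm
        obtain ⟨v, hv⟩ := hvv
        have hveq : v = L.filter (fun t => pvPre12 t == pvPre12 b) := hval _ v hv
        rw [if_neg (by simp only [beq_iff_eq]; omega)]
        rw [← hveq, pv_insert_self_eq hnd hv]
        apply ih _ _ _ hnd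
        · intro q; rw [PySem.Dict.getD_insert]
          split_ifs with hq
          · have := hpos (pvPre12 b); omega
          · exact hpos q
        · intro q; rw [PySem.Dict.getD_insert]
          split_ifs with hq
          · exact iff_of_true (hq ▸ hs) (by omega)
          · exact hseen q
        · intro q; rw [PySem.Dict.getD_insert]
          split_ifs with hq
          · exact iff_of_true (hq ▸ hdc) (by omega)
          · exact hdup q
        · rw [hveq] at hv
          intro q w hw
          exact hval q w hw
    · -- first occurrence of this prefix
      have hsc : seen.contains (pvPre12 b) = false :=
        pv_contains_false_of_not_mem _ _ hs
      have hc0 : cnt.getD (pvPre12 b) 0 = 0 := by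
        have h1 := hseen (pvPre12 b)
        have h2 := hpos (pvPre12 b)
        by_contra h
        exact hs (h1.mpr (by omega))
      rw [if_pos hsc, if_neg (by simp only [beq_iff_eq]; omega)]
      apply ih _ _ _ hnd
      · intro q; rw [PySem.Dict.getD_insert]
        split_ifs with hq
        · omega
        · exact hpos q
      · intro q; rw [PySem.Dict.getD_insert, List.mem_append, List.mem_singleton]
        by_cases hq : q = pvPre12 b
        · subst hq; simp [hc0]
        · rw [if_neg hq]
          constructor
          · intro h
            rcases h with h | h
            · exact (hseen q).mp h
            · exact absurd h hq
          · intro h; exact Or.inl ((hseen q).mpr h)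
      · intro q; rw [PySem.Dict.getD_insert]
        split_ifs with hq
        · refine iff_of_false ?_ (by omega)
          intro h
          have h2 := (hdup q).mp h
          rw [hq] at h2
          omega
        · exact hdup q
      · exact hval

-- ===== VERDICT (by name: the statement is the Claim_ definition above) =====
theorem check_patdupsamp_spec : Claim_equal_check_patdupsamp := by
  intro l _
  unfold Spec_check_patdupsamp check_patdupsamp check_patdupsamp_alt
  have hg : ∀ pat, (l.foldl (fun g barcode => g.modify (pvPre12 barcode) [] (· ++ [barcode])) PySem.Dict.empty).getD pat []
      = l.filter (fun t => pvPre12 t == pat) := by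
    intro pat; rw [pv_getD_groups]; simp [PySem.Dict.getD_empty]
  have hmain := pv_main l l [] PySem.Dict.empty PySem.Dict.empty
    (by simp)
    (fun p => by simp [PySem.Dict.getD_empty])
    (fun p => by simp [PySem.Dict.getD_empty])
    (fun p => by simp [PySem.Dict.contains_empty, PySem.Dict.getD_empty])
    (fun p v hv => by simp [PySem.Dict.get?_empty] at hv)
  have hfun : (fun (st : PySem.Dict String Int × PySem.Dict String (List String)) barcode =>
      if (st.1.getD (pvPre12 barcode) 0 + 1) == 2 then
        (st.1.insert (pvPre12 barcode) (st.1.getD (pvPre12 barcode) 0 + 1),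
         st.2.insert (pvPre12 barcode)
           ((l.foldl (fun g barcode => g.modify (pvPre12 barcode) [] (· ++ [barcode])) PySem.Dict.empty).getD (pvPre12 barcode) []))
      else
        (st.1.insert (pvPre12 barcode) (st.1.getD (pvPre12 barcode) 0 + 1), st.2))
    = (fun (st : PySem.Dict String Int × PySem.Dict String (List String)) barcode =>
      if (st.1.getD (pvPre12 barcode) 0 + 1) == 2 then
        (st.1.insert (pvPre12 barcode) (st.1.getD (pvPre12 barcode) 0 + 1),
         st.2.insert (pvPre12 barcode) (l.filter (fun t => pvPre12 t == pvPre12 barcode)))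
      else
        (st.1.insert (pvPre12 barcode) (st.1.getD (pvPre12 barcode) 0 + 1), st.2)) := by
    funext st barcode; rw [hg]
  simp only [hfun]
  rw [← hmain]
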